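-- pv_equiv track=rewrite | github.com/Kudito98/Codesignal-tasks | graphs-arcade/20-isPseudoforest/isPseudoforest.py | solution
-- ===== SOURCE A (Python) =====
-- from collections import defaultdict
--
-- def solution(n, wmap):
--     adj = defaultdict(set)
--     for s, e in wmap:
--         adj[s].add(e)
--         adj[e].add(s)
--
--     def explore(node):
--         if node not in adj:
--             return 1
--         count = -1
--         for dest in adj.pop(node, []):
--             count += explore(dest)
--         return count
--
--     while adj:
--         if explore(next(iter(adj))) > 1:
--             return False
--     return True
-- ===== SOURCE B (Python) =====
-- def solution(n, wmap):
--     adj = {}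
--     for s, e in wmap:
--         adj.setdefault(s, set()).add(e)
--         adj.setdefault(e, set()).add(s)
--     visited = set()
--     for start in adj:
--         if start in visited:
--             continue
--         visited.add(start)
--         stack = [start]
--         nodes = 0
--         entries = 0
--         while stack:
--             u = stack.pop()
--             nodes += 1
--             entries += len(adj[u])
--             for v in adj[u]:
--                 if v not in visited:
--                     visited.add(v)
--                     stack.append(v)
--         if entries > 2 * nodes:
--             return False
--     return True
-- ===== Notes on version B (the rewrite author's own statement) =====
-- stated objective: alternative
-- what changed: A detects over-edged components with a recursive DFS that destructively pops nodes from the adjacency dict and folds the +1/-1 return-value trick into a single count; B keeps the dict intact and runs an iterative explicit-stack DFS with a visited set, tallying each component's node count and adjacency-entry count and checking entries <= 2*nodes.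
import Mathlib
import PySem

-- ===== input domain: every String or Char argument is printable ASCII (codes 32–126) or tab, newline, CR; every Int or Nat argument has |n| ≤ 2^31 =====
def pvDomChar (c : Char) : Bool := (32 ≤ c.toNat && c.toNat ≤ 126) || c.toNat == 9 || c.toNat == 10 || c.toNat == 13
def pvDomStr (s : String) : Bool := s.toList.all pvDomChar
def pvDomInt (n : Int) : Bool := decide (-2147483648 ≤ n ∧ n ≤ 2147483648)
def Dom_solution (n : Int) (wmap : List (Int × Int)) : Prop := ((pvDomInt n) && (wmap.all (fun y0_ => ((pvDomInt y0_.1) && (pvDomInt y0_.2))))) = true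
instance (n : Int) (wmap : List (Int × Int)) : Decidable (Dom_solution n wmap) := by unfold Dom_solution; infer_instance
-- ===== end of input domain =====

-- B replaces A's node-deleting recursive DFS (±1 count trick) by an iterative explicit-stack DFS
-- with a visited set that tallies each component's node and adjacency-entry counts; same results.

-- ===== PORT A =====
-- A: build the symmetric adjacency dict of sets (defaultdict(set)).
def buildAdjA (wmap : List (Int × Int)) : PySem.Dict Int (PySem.Set Int) :=
  wmap.foldl (fun adj se =>
    (adj.modify se.1 PySem.Set.empty (fun s => PySem.Set.add s se.2)).modify se.2
      PySem.Set.empty (fun s => PySem.Set.add s se.1))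
    PySem.Dict.empty

-- A's recursive `explore`, threading the mutated dict; fuel is an upper bound on the
-- recursion depth (A pops a key before each recursive descent, so adj.size+1 suffices).
def exploreA (fuel : Nat) (adj : PySem.Dict Int (PySem.Set Int)) (node : Int) :
    Int × PySem.Dict Int (PySem.Set Int) :=
  match fuel with
  | 0 => (1, adj)
  | fuel + 1 =>
    match adj.pop? node with
    | none => (1, adj)                     -- `if node not in adj: return 1`
    | some (s, adj') =>                    -- `for dest in adj.pop(node, []): count += explore(dest)`
      s.foldl (fun acc dest =>
        let r := exploreA fuel acc.2 dest
        (acc.1 + r.1, r.2)) ((-1 : Int), adj')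

-- A's `while adj:` loop; each iteration pops at least the chosen first key.
def loopA (fuel : Nat) (adj : PySem.Dict Int (PySem.Set Int)) : Bool :=
  match fuel with
  | 0 => true
  | fuel + 1 =>
    match adj.keys with
    | [] => true
    | k :: _ =>
      let r := exploreA (adj.size + 1) adj k
      if 1 < r.1 then false else loopA fuel r.2

def solution (n : Int) (wmap : List (Int × Int)) : Bool :=
  let adj := buildAdjA wmap
  loopA (adj.size + 1) adj

-- ===== PORT B =====
-- B: adjacency via setdefault(s, set()).add(e) — get-or-append the empty set, then overwrite
-- the key with the enlarged set (Python mutates the set returned by setdefault in place).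
def buildAdjB (wmap : List (Int × Int)) : PySem.Dict Int (PySem.Set Int) :=
  wmap.foldl (fun adj se =>
    let a1 := adj.setdefault se.1 PySem.Set.empty
    let a2 := a1.insert se.1 (PySem.Set.add (a1.getD se.1 PySem.Set.empty) se.2)
    let b1 := a2.setdefault se.2 PySem.Set.empty
    b1.insert se.2 (PySem.Set.add (b1.getD se.2 PySem.Set.empty) se.1))
    PySem.Dict.empty

-- B's inner `while stack:` loop (stack top = list head, matching python's append/pop at the end);
-- fuel bounds the number of pops: 1 + number of unvisited keys ≤ adj.size + 1.
def dfsB (fuel : Nat) (adj : PySem.Dict Int (PySem.Set Int)) (stack : List Int)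
    (visited : PySem.Set Int) (nodes entries : Int) : Int × Int × PySem.Set Int :=
  match fuel with
  | 0 => (nodes, entries, visited)
  | fuel + 1 =>
    match stack with
    | [] => (nodes, entries, visited)
    | u :: rest =>
      let s := adj.getD u PySem.Set.empty
      let sv := s.foldl (fun (p : List Int × PySem.Set Int) v =>
          if p.2.contains v then p else (v :: p.1, PySem.Set.add p.2 v)) (rest, visited)
      dfsB fuel adj sv.1 sv.2 (nodes + 1) (entries + (s.length : Int))

-- B's `for start in adj:` loop over the keys, skipping visited starts.
def loopB (adj : PySem.Dict Int (PySem.Set Int)) (keys : List Int)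
    (visited : PySem.Set Int) : Bool :=
  match keys with
  | [] => true
  | k :: rest =>
    if visited.contains k then loopB adj rest visited
    else
      let r := dfsB (adj.size + 1) adj [k] (PySem.Set.add visited k) 0 0
      if 2 * r.1 < r.2.1 then false else loopB adj rest r.2.2

def solution_alt (n : Int) (wmap : List (Int × Int)) : Bool :=
  let adj := buildAdjB wmap
  loopB adj adj.keys PySem.Set.empty

-- ===== PRECONDITION & SPEC =====
def Spec_solution (n : Int) (wmap : List (Int × Int)) (out : Bool) : Prop := out = solution_alt n wmap
instance (n : Int) (wmap : List (Int × Int)) (out : Bool) : Decidable (Spec_solution n wmap out) := by unfold Spec_solution; infer_instance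

-- ===== CLAIM (what is proved, stated in full; the proofs are below) =====
def Claim_equal_solution : Prop := ∀ (n : Int) (wmap : List (Int × Int)), Dom_solution n wmap → Spec_solution n wmap (solution n wmap)

-- ===== LEMMAS AND PROOFS =====

-- ===== VERDICT (by name: the statement is the Claim_ definition above) =====
-- ===== proof-layer definitions =====
abbrev PvAdj : Type := PySem.Dict Int (PySem.Set Int)

def pvEdge (G : PvAdj) (u v : Int) : Prop := v ∈ G.getD u PySem.Set.empty

def pvReach (G : PvAdj) (u v : Int) : Prop := Relation.ReflTransGen (pvEdge G) u v

def pvKeep (G : PvAdj) (R : List Int) : PvAdj :=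
  PySem.Dict.mk (G.items.filter (fun p => !decide (p.1 ∈ R)))

def pvEnt (G : PvAdj) (R : List Int) : Int :=
  (R.map (fun k => ((G.getD k PySem.Set.empty).length : Int))).sum

-- ===== infrastructure lemmas =====
theorem pvGet?_keep (G : PvAdj) (R : List Int) (u : Int) :
    (pvKeep G R).get? u = if u ∈ R then none else G.get? u := by
  obtain ⟨l⟩ := G
  induction l with
  | nil => simp [pvKeep, PySem.Dict.get?]
  | cons p rest ih =>
    by_cases hpu : p.1 = u
    · by_cases hR : u ∈ R
      · simp [pvKeep, PySem.Dict.get?, hpu, hR] at ih ⊢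
        simpa [hR] using ih
      · simp [pvKeep, PySem.Dict.get?, hpu, hR]
    · by_cases hpR : p.1 ∈ R <;>
      · simp [pvKeep, PySem.Dict.get?, hpR, hpu] at ih ⊢
        simpa using ih

theorem pvGetD_keep (G : PvAdj) (R : List Int) (u : Int) (d : PySem.Set Int) :
    (pvKeep G R).getD u d = if u ∈ R then d else G.getD u d := by
  simp only [PySem.Dict.getD, pvGet?_keep]
  by_cases h : u ∈ R <;> simp [h]

theorem pvContains_keep (G : PvAdj) (R : List Int) (u : Int) :
    (pvKeep G R).contains u = true ↔ (u ∉ R ∧ G.contains u = true) := by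
  rw [PySem.Dict.contains_eq_isSome_get?, PySem.Dict.contains_eq_isSome_get?, pvGet?_keep]
  by_cases h : u ∈ R <;> simp [h]

theorem pvKeys_keep (G : PvAdj) (R : List Int) :
    (pvKeep G R).keys = G.keys.filter (fun k => !decide (k ∈ R)) := by
  obtain ⟨l⟩ := G
  simp only [pvKeep, PySem.Dict.keys]
  induction l with
  | nil => simp
  | cons p rest ih =>
    by_cases hpR : p.1 ∈ R <;> simp [hpR, ih]

theorem pvSize_keep_le (G : PvAdj) (R : List Int) : (pvKeep G R).size ≤ G.size :=
  List.length_filter_le _ _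

theorem pvSize_keep_lt (G : PvAdj) (R : List Int) (k : Int)
    (hc : G.contains k = true) (hk : k ∈ R) : (pvKeep G R).size < G.size := by
  have : ∃ p ∈ G.items, p.1 = k := by
    simpa [PySem.Dict.contains, List.any_eq_true] using hc
  obtain ⟨p, hp, hpk⟩ := this
  exact List.length_filter_lt_length_iff_exists.2 ⟨p, hp, by simp [hpk, hk]⟩

theorem pvEdge_keep_elim {G : PvAdj} {R : List Int} {u v : Int}
    (h : pvEdge (pvKeep G R) u v) : u ∉ R ∧ pvEdge G u v := by
  by_cases hR : u ∈ R
  · exfalso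
    simp [pvEdge, pvGetD_keep, hR, PySem.Set.empty] at h
  · refine ⟨hR, ?_⟩
    simpa [pvEdge, pvGetD_keep, hR] using h

theorem pvEdge_keep_iff {G : PvAdj} {R : List Int} {u : Int} (hu : u ∉ R) (v : Int) :
    pvEdge (pvKeep G R) u v ↔ pvEdge G u v := by
  simp [pvEdge, pvGetD_keep, hu]

theorem pvReach_keep_mono {G : PvAdj} {R : List Int} {u v : Int}
    (h : pvReach (pvKeep G R) u v) : pvReach G u v :=
  Relation.ReflTransGen.mono (fun _ _ hab => (pvEdge_keep_elim hab).2) h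

theorem pvContains_of_edge {G : PvAdj} {u v : Int} (h : pvEdge G u v) :
    G.contains u = true := by
  rw [PySem.Dict.contains_eq_isSome_get?]
  unfold pvEdge PySem.Dict.getD at h
  cases hg : G.get? u with
  | none => rw [hg] at h; simp [PySem.Set.empty] at h
  | some s => simp

theorem pvKeep_nil (G : PvAdj) : pvKeep G [] = G := by
  obtain ⟨l⟩ := G; simp [pvKeep]

theorem pvKeep_keep (G : PvAdj) (S1 S2 : List Int) :
    pvKeep (pvKeep G S1) S2 = pvKeep G (S1 ++ S2) := by
  obtain ⟨l⟩ := G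
  simp only [pvKeep, List.filter_filter]
  congr 1
  apply List.filter_congr
  intro x _
  by_cases h1 : x.1 ∈ S1 <;> by_cases h2 : x.1 ∈ S2 <;> simp [h1, h2]

theorem pvErase_eq_keep (G : PvAdj) (k : Int) : G.erase k = pvKeep G [k] := by
  obtain ⟨l⟩ := G
  simp only [PySem.Dict.erase, pvKeep]
  congr 1
  apply List.filter_congr
  intro x _
  by_cases h : x.1 = k <;> simp [h]

theorem pvEnt_nil (G : PvAdj) : pvEnt G [] = 0 := rfl

theorem pvEnt_cons (G : PvAdj) (k : Int) (R : List Int) :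
    pvEnt G (k :: R) = ((G.getD k PySem.Set.empty).length : Int) + pvEnt G R := by
  simp [pvEnt]

theorem pvEnt_append (G : PvAdj) (R S : List Int) :
    pvEnt G (R ++ S) = pvEnt G R + pvEnt G S := by
  simp [pvEnt]

theorem pvEnt_congr {G G' : PvAdj} {S : List Int}
    (h : ∀ k ∈ S, G'.getD k PySem.Set.empty = G.getD k PySem.Set.empty) :
    pvEnt G' S = pvEnt G S := by
  unfold pvEnt
  congr 1
  exact List.map_congr_left (fun a ha => by rw [h a ha])

theorem pvEnt_perm (G : PvAdj) {R S : List Int} (h : R.Perm S) :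
    pvEnt G R = pvEnt G S :=
  List.Perm.sum_eq (h.map _)

theorem pvGetD_of_get? {G : PvAdj} {u : Int} {s : PySem.Set Int}
    (h : G.get? u = some s) : G.getD u PySem.Set.empty = s := by
  simp [PySem.Dict.getD, h]
-- ===== characterization of A's explore =====
theorem pvFoldExplore_spec (fuel : Nat)
    (IH : ∀ (G : PvAdj) (node : Int), G.size < fuel →
      ∃ R : List Int, R.Nodup ∧
        (∀ k, k ∈ R ↔ (G.contains k = true ∧ pvReach G node k)) ∧
        exploreA fuel G node = (pvEnt G R - 2 * R.length + 1, pvKeep G R)) :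
    ∀ (ds : List Int) (H : PvAdj) (c : Int), H.size < fuel →
      ∃ S : List Int, S.Nodup ∧
        (∀ k ∈ S, H.contains k = true ∧ ∃ d ∈ ds, pvReach H d k) ∧
        (∀ u ∈ S, ∀ v, pvEdge H u v → H.contains v = true → v ∈ S) ∧
        (∀ d ∈ ds, H.contains d = true → d ∈ S) ∧
        ds.foldl (fun acc dest =>
          let r := exploreA fuel acc.2 dest
          (acc.1 + r.1, r.2)) (c, H)
          = (c + pvEnt H S - 2 * S.length + ds.length, pvKeep H S) := by
  intro ds
  induction ds with
  | nil =>
    intro H c hsz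
    refine ⟨[], by simp, by simp, by simp, by simp, ?_⟩
    simp [pvEnt_nil, pvKeep_nil]
  | cons d ds ih =>
    intro H c hsz
    obtain ⟨S1, hS1nd, hS1iff, hA⟩ := IH H d hsz
    have hS1c : ∀ k ∈ S1, H.contains k = true := fun k hk => ((hS1iff k).1 hk).1
    have hH1sz : (pvKeep H S1).size < fuel := lt_of_le_of_lt (pvSize_keep_le H S1) hsz
    obtain ⟨S2, hS2nd, hS2sound, hS2cl, hS2d, hfold⟩ := ih (pvKeep H S1) (c + (pvEnt H S1 - 2 * S1.length + 1)) hH1sz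
    have hS2c : ∀ k ∈ S2, k ∉ S1 ∧ H.contains k = true :=
      fun k hk => (pvContains_keep H S1 k).1 (hS2sound k hk).1
    refine ⟨S1 ++ S2, ?_, ?_, ?_, ?_, ?_⟩
    · rw [List.nodup_append]
      exact ⟨hS1nd, hS2nd, fun a ha b hb hab => (hS2c b hb).1 (hab ▸ ha)⟩
    · intro k hk
      rcases List.mem_append.1 hk with hk1 | hk2
      · exact ⟨hS1c k hk1, d, List.mem_cons_self .., ((hS1iff k).1 hk1).2⟩
      · obtain ⟨d', hd', hr⟩ := (hS2sound k hk2).2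
        exact ⟨(hS2c k hk2).2, d', List.mem_cons_of_mem _ hd', pvReach_keep_mono hr⟩
    · intro u hu v hev hcv
      rcases List.mem_append.1 hu with hu1 | hu2
      · by_cases hvS1 : v ∈ S1
        · exact List.mem_append.2 (Or.inl hvS1)
        · exact absurd ((hS1iff v).2 ⟨hcv, Relation.ReflTransGen.tail ((hS1iff u).1 hu1).2 hev⟩) hvS1
      · have huK : u ∉ S1 := (hS2c u hu2).1
        have hevK : pvEdge (pvKeep H S1) u v := (pvEdge_keep_iff huK v).2 hev
        by_cases hvS1 : v ∈ S1
        · exact List.mem_append.2 (Or.inl hvS1)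
        · have hcvK : (pvKeep H S1).contains v = true := (pvContains_keep H S1 v).2 ⟨hvS1, hcv⟩
          exact List.mem_append.2 (Or.inr (hS2cl u hu2 v hevK hcvK))
    · intro d' hd' hcd'
      rcases List.mem_cons.1 hd' with rfl | hds
      · exact List.mem_append.2 (Or.inl ((hS1iff d').2 ⟨hcd', Relation.ReflTransGen.refl⟩))
      · by_cases hdS1 : d' ∈ S1
        · exact List.mem_append.2 (Or.inl hdS1)
        · have : (pvKeep H S1).contains d' = true := (pvContains_keep H S1 d').2 ⟨hdS1, hcd'⟩
          exact List.mem_append.2 (Or.inr (hS2d d' hds this))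
    · have hstep : (d :: ds).foldl (fun acc dest =>
          let r := exploreA fuel acc.2 dest
          (acc.1 + r.1, r.2)) (c, H)
          = ds.foldl (fun acc dest =>
          let r := exploreA fuel acc.2 dest
          (acc.1 + r.1, r.2)) (c + (pvEnt H S1 - 2 * S1.length + 1), pvKeep H S1) := by
        simp only [List.foldl_cons, hA]
      rw [hstep, hfold, pvKeep_keep]
      have hEnt : pvEnt (pvKeep H S1) S2 = pvEnt H S2 :=
        pvEnt_congr (fun k hk => by rw [pvGetD_keep]; simp [(hS2c k hk).1])
      rw [hEnt, pvEnt_append]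
      congr 1
      push_cast [List.length_append, List.length_cons]
      ring
theorem pvExploreA_spec : ∀ (fuel : Nat) (G : PvAdj) (node : Int), G.size < fuel →
    ∃ R : List Int, R.Nodup ∧
      (∀ k, k ∈ R ↔ (G.contains k = true ∧ pvReach G node k)) ∧
      exploreA fuel G node = (pvEnt G R - 2 * R.length + 1, pvKeep G R) := by
  intro fuel
  induction fuel with
  | zero => intro G node h; omega
  | succ fuel IH =>
    intro G node hsz
    cases hg : G.get? node with
    | none =>
      have hc : G.contains node = false := by
        rw [PySem.Dict.contains_eq_isSome_get?, hg]; rfl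
      refine ⟨[], by simp, ?_, ?_⟩
      · intro k
        simp only [List.not_mem_nil, false_iff]
        rintro ⟨hck, hrk⟩
        rcases Relation.ReflTransGen.cases_head hrk with rfl | ⟨b, hb, _⟩
        · rw [hc] at hck; exact Bool.false_ne_true hck
        · unfold pvEdge PySem.Dict.getD at hb
          rw [hg] at hb
          simp [PySem.Set.empty] at hb
      · simp [exploreA, PySem.Dict.pop?, hg, pvEnt_nil, pvKeep_nil]
    | some s =>
      have hc : G.contains node = true := by
        rw [PySem.Dict.contains_eq_isSome_get?, hg]; rfl
      have hGd : G.getD node PySem.Set.empty = s := pvGetD_of_get? hg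
      have hHsz : (pvKeep G [node]).size < fuel := by
        have := pvSize_keep_lt G [node] node hc (List.mem_singleton.2 rfl)
        omega
      obtain ⟨S, hSnd, hSsound, hScl, hSd, hfold⟩ :=
        pvFoldExplore_spec fuel IH s (pvKeep G [node]) (-1) hHsz
      have hSc : ∀ k ∈ S, k ∉ ([node] : List Int) ∧ G.contains k = true :=
        fun k hk => (pvContains_keep G [node] k).1 (hSsound k hk).1
      have hnodeS : node ∉ S := by
        intro h
        exact (hSc node h).1 (List.mem_singleton.2 rfl)
      have hunf : exploreA (fuel + 1) G node
          = s.foldl (fun acc dest =>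
              let r := exploreA fuel acc.2 dest
              (acc.1 + r.1, r.2)) ((-1 : Int), pvKeep G [node]) := by
        simp [exploreA, PySem.Dict.pop?, hg, pvErase_eq_keep]
      -- closure of node :: S under edges of G into keys of G
      have hT : ∀ x, pvReach G node x → G.contains x = true → x ∈ node :: S := by
        intro x hx
        induction hx with
        | refl => intro _; exact List.mem_cons_self
        | @tail b c hreach hedge ihb =>
          intro hcc
          have hb : G.contains b = true := pvContains_of_edge hedge
          rcases List.mem_cons.1 (ihb hb) with hbn | hbS
          · -- b = node : c is a direct neighbour
            rw [hbn] at hedge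
            have hcs : c ∈ s := by rwa [pvEdge, hGd] at hedge
            by_cases hcn : c = node
            · exact hcn ▸ List.mem_cons_self
            · have : (pvKeep G [node]).contains c = true :=
                (pvContains_keep G [node] c).2 ⟨by simp [hcn], hcc⟩
              exact List.mem_cons_of_mem _ (hSd c hcs this)
          · have hbK : b ∉ ([node] : List Int) := (hSc b hbS).1
            have hedgeK : pvEdge (pvKeep G [node]) b c := (pvEdge_keep_iff hbK c).2 hedge
            by_cases hcn : c = node
            · exact hcn ▸ List.mem_cons_self
            · have hccK : (pvKeep G [node]).contains c = true :=
                (pvContains_keep G [node] c).2 ⟨by simp [hcn], hcc⟩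
              exact List.mem_cons_of_mem _ (hScl b hbS c hedgeK hccK)
      refine ⟨node :: S, by simp [hSnd, hnodeS], ?_, ?_⟩
      · intro k
        constructor
        · intro hk
          rcases List.mem_cons.1 hk with hkn | hkS
          · subst hkn
            exact ⟨hc, Relation.ReflTransGen.refl⟩
          · obtain ⟨d', hd', hr⟩ := (hSsound k hkS).2
            have hed : pvEdge G node d' := by rw [pvEdge, hGd]; exact hd'
            exact ⟨(hSc k hkS).2,
              Relation.ReflTransGen.head hed (pvReach_keep_mono hr)⟩
        · rintro ⟨hck, hrk⟩
          exact hT k hrk hck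
      · rw [hunf, hfold]
        have hkeep : pvKeep (pvKeep G [node]) S = pvKeep G (node :: S) := by
          rw [pvKeep_keep]; rfl
        rw [hkeep]
        have hEnt : pvEnt (pvKeep G [node]) S = pvEnt G S :=
          pvEnt_congr (fun k hk => by rw [pvGetD_keep]; simp [(hSc k hk).1])
        rw [hEnt]
        congr 1
        rw [pvEnt_cons, hGd]
        push_cast [List.length_cons]
        ring
-- ===== characterization of B's stack DFS =====
theorem pvFoldPush_spec : ∀ (s st : List Int) (vis : PySem.Set Int),
    ∃ news : List Int,
      s.foldl (fun (p : List Int × PySem.Set Int) v =>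
        if p.2.contains v then p else (v :: p.1, PySem.Set.add p.2 v)) (st, vis)
        = (news.reverse ++ st, vis ++ news) ∧
      news.Nodup ∧ (∀ x ∈ news, x ∈ s ∧ x ∉ vis) ∧ (∀ x ∈ s, x ∈ vis ∨ x ∈ news) := by
  intro s
  induction s with
  | nil => intro st vis; exact ⟨[], by simp, by simp, by simp, by simp⟩
  | cons v s ih =>
    intro st vis
    by_cases hv : v ∈ vis
    · have hc : vis.contains v = true := by
        simpa [PySem.Set.contains] using hv
      obtain ⟨news, heq, hnd, hmem, hcov⟩ := ih st vis
      refine ⟨news, ?_, hnd,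
        fun x hx => ⟨List.mem_cons_of_mem _ (hmem x hx).1, (hmem x hx).2⟩, ?_⟩
      · rw [List.foldl_cons]
        simp only [hc, if_true]
        exact heq
      · intro x hx
        rcases List.mem_cons.1 hx with rfl | hxs
        · exact Or.inl hv
        · exact hcov x hxs
    · have hc : vis.contains v = false := by
        simpa [PySem.Set.contains] using hv
      obtain ⟨news, heq, hnd, hmem, hcov⟩ := ih (v :: st) (vis ++ [v])
      refine ⟨v :: news, ?_, ?_, ?_, ?_⟩
      · rw [List.foldl_cons]
        simp only [hc, Bool.false_eq_true, if_false]
        rw [PySem.Set.add_of_not_mem hv, heq]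
        simp [List.append_assoc]
      · refine List.nodup_cons.2 ⟨?_, hnd⟩
        intro hvn
        exact (hmem v hvn).2 (List.mem_append_right _ (List.mem_singleton.2 rfl))
      · intro x hx
        rcases List.mem_cons.1 hx with rfl | hxn
        · exact ⟨List.mem_cons_self, hv⟩
        · refine ⟨List.mem_cons_of_mem _ (hmem x hxn).1, fun hxv => ?_⟩
          exact (hmem x hxn).2 (List.mem_append_left _ hxv)
      · intro x hx
        rcases List.mem_cons.1 hx with rfl | hxs
        · exact Or.inr List.mem_cons_self
        · rcases hcov x hxs with hxv | hxn
          · rcases List.mem_append.1 hxv with h | h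
            · exact Or.inl h
            · exact Or.inr (by simp [List.mem_singleton.1 h])
          · exact Or.inr (List.mem_cons_of_mem _ hxn)

theorem pvCount_unvisited (keys : List Int) (hknd : keys.Nodup) (vis news : List Int)
    (hnd : news.Nodup) (hsub : ∀ x ∈ news, x ∈ keys) (hdis : ∀ x ∈ news, x ∉ vis) :
    (keys.filter (fun x => !decide (x ∈ vis ++ news))).length + news.length
      = (keys.filter (fun x => !decide (x ∈ vis))).length := by
  have hpart := List.length_eq_length_filter_add
    (l := keys.filter (fun x => !decide (x ∈ vis))) (fun x => decide (x ∈ news))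
  rw [List.filter_filter, List.filter_filter] at hpart
  have h1 : keys.filter (fun x => decide (x ∈ news) && !decide (x ∈ vis))
      = keys.filter (fun x => decide (x ∈ news)) := by
    apply List.filter_congr
    intro x _
    by_cases hx : x ∈ news
    · simp [hx, hdis x hx]
    · simp [hx]
  have h2 : (keys.filter (fun x => decide (x ∈ news))).length = news.length := by
    have hp : (keys.filter (fun x => decide (x ∈ news))).Perm news := by
      rw [List.perm_ext_iff_of_nodup (hknd.filter _) hnd]
      intro a
      simp only [List.mem_filter, decide_eq_true_eq]
      exact ⟨fun h => h.2, fun h => ⟨hsub a h, h⟩⟩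
    exact hp.length_eq
  have h3 : keys.filter (fun x => !decide (x ∈ news) && !decide (x ∈ vis))
      = keys.filter (fun x => !decide (x ∈ vis ++ news)) := by
    apply List.filter_congr
    intro x _
    by_cases h1 : x ∈ news <;> by_cases h2 : x ∈ vis <;> simp [h1, h2]
  rw [h1, h3] at hpart
  omega
theorem pvDfsB_spec : ∀ (fuel : Nat) (G : PvAdj) (stack : List Int) (vis : PySem.Set Int)
    (no en : Int) (Q : Int → Prop),
    G.keys.Nodup →
    (∀ u v, pvEdge G u v → G.contains v = true) →
    vis.Nodup → stack.Nodup →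
    (∀ x ∈ stack, x ∈ vis) →
    (∀ x ∈ stack, G.contains x = true) →
    (∀ x ∈ vis, x ∉ stack → ∀ v, pvEdge G x v → v ∈ vis) →
    (∀ x ∈ stack, Q x) →
    (∀ u v, Q u → pvEdge G u v → Q v) →
    stack.length + (G.keys.filter (fun x => !decide (x ∈ vis))).length < fuel →
    ∃ (P : List Int) (V' : PySem.Set Int),
      dfsB fuel G stack vis no en = (no + P.length, en + pvEnt G P, V') ∧
      P.Nodup ∧
      (∀ x ∈ P, Q x) ∧
      (∀ x ∈ P, G.contains x = true) ∧
      (∀ x ∈ stack, x ∈ P) ∧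
      (∀ x ∈ P, x ∈ stack ∨ x ∉ vis) ∧
      (∀ x, x ∈ V' ↔ (x ∈ vis ∨ x ∈ P)) ∧
      V'.Nodup ∧
      (∀ x ∈ V', ∀ v, pvEdge G x v → v ∈ V') := by
  intro fuel
  induction fuel with
  | zero => intro G stack vis no en Q _ _ _ _ _ _ _ _ _ h; omega
  | succ fuel IH =>
    intro G stack vis no en Q hknd hmemk hvnd hsnd hsv hsk hcl hQs hQc hfuel
    cases stack with
    | nil =>
      refine ⟨[], vis, ?_, by simp, by simp, by simp, by simp, by simp, by simp,
        hvnd, fun x hx v he => hcl x hx (List.not_mem_nil) v he⟩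
      simp [dfsB, pvEnt_nil]
    | cons u rest =>
      obtain ⟨news, heq, hnwnd, hnwmem, hnwcov⟩ :=
        pvFoldPush_spec (G.getD u PySem.Set.empty) rest vis
      have huv : u ∈ vis := hsv u List.mem_cons_self
      have hnewE : ∀ x ∈ news, pvEdge G u x := fun x hx => (hnwmem x hx).1
      have hnewK : ∀ x ∈ news, G.contains x = true :=
        fun x hx => hmemk u x (hnewE x hx)
      have hnewNV : ∀ x ∈ news, x ∉ vis := fun x hx => (hnwmem x hx).2
      have hrestv : ∀ x ∈ rest, x ∈ vis := fun x hx => hsv x (List.mem_cons_of_mem _ hx)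
      -- hypotheses for the recursive call
      have hvnd' : (vis ++ news).Nodup :=
        List.nodup_append.2 ⟨hvnd, hnwnd, fun a ha b hb hab => hnewNV b hb (hab ▸ ha)⟩
      have hsnd' : (news.reverse ++ rest).Nodup := by
        refine List.nodup_append.2 ⟨List.nodup_reverse.2 hnwnd, (List.nodup_cons.1 hsnd).2, ?_⟩
        intro a ha b hb hab
        exact hnewNV a (List.mem_reverse.1 ha) (hab ▸ hrestv b hb)
      have hsv' : ∀ x ∈ news.reverse ++ rest, x ∈ vis ++ news := by
        intro x hx
        rcases List.mem_append.1 hx with h | h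
        · exact List.mem_append_right _ (List.mem_reverse.1 h)
        · exact List.mem_append_left _ (hrestv x h)
      have hsk' : ∀ x ∈ news.reverse ++ rest, G.contains x = true := by
        intro x hx
        rcases List.mem_append.1 hx with h | h
        · exact hnewK x (List.mem_reverse.1 h)
        · exact hsk x (List.mem_cons_of_mem _ h)
      have hcl' : ∀ x ∈ vis ++ news, x ∉ news.reverse ++ rest →
          ∀ v, pvEdge G x v → v ∈ vis ++ news := by
        intro x hx hxs v he
        rcases List.mem_append.1 hx with hxv | hxn
        · by_cases hxu : x = u
          · subst hxu
            rcases hnwcov v he with h | h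
            · exact List.mem_append_left _ h
            · exact List.mem_append_right _ h
          · have hxst : x ∉ u :: rest := by
              intro hmem
              rcases List.mem_cons.1 hmem with h | h
              · exact hxu h
              · exact hxs (List.mem_append_right _ h)
            exact List.mem_append_left _ (hcl x hxv hxst v he)
        · exact absurd (List.mem_append_left _ (List.mem_reverse.2 hxn)) hxs
      have hQs' : ∀ x ∈ news.reverse ++ rest, Q x := by
        intro x hx
        rcases List.mem_append.1 hx with h | h
        · exact hQc u x (hQs u List.mem_cons_self) (hnewE x (List.mem_reverse.1 h))
        · exact hQs x (List.mem_cons_of_mem _ h)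
      have hcount := pvCount_unvisited G.keys hknd vis news hnwnd
        (fun x hx => (PySem.Dict.contains_iff_mem_keys G x).1 (hnewK x hx)) hnewNV
      have hfuel' : (news.reverse ++ rest).length
          + (G.keys.filter (fun x => !decide (x ∈ vis ++ news))).length < fuel := by
        simp only [List.length_append, List.length_reverse]
        simp only [List.length_cons] at hfuel
        omega
      obtain ⟨P', V'', hres, hPnd, hPQ, hPk, hstP, hPsv, hViff, hVnd, hVcl⟩ :=
        IH G (news.reverse ++ rest) (vis ++ news) (no + 1)
          (en + ((G.getD u PySem.Set.empty).length : Int)) Q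
          hknd hmemk hvnd' hsnd' hsv' hsk' hcl' hQs' hQc hfuel'
      have hnewsP : ∀ x ∈ news, x ∈ P' :=
        fun x hx => hstP x (List.mem_append_left _ (List.mem_reverse.2 hx))
      have hrestP : ∀ x ∈ rest, x ∈ P' :=
        fun x hx => hstP x (List.mem_append_right _ hx)
      have huP' : u ∉ P' := by
        intro hu
        rcases hPsv u hu with h | h
        · rcases List.mem_append.1 h with h1 | h1
          · exact hnewNV u (List.mem_reverse.1 h1) huv
          · exact (List.nodup_cons.1 hsnd).1 h1
        · exact h (List.mem_append_left _ huv)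
      have hstep : dfsB (fuel + 1) G (u :: rest) vis no en
          = dfsB fuel G (news.reverse ++ rest) (vis ++ news) (no + 1)
              (en + ((G.getD u PySem.Set.empty).length : Int)) := by
        simp only [dfsB]
        rw [heq]
      refine ⟨u :: P', V'', ?_, List.nodup_cons.2 ⟨huP', hPnd⟩, ?_, ?_, ?_, ?_, ?_, hVnd, hVcl⟩
      · rw [hstep, hres, pvEnt_cons]
        simp only [List.length_cons, Prod.mk.injEq]
        refine ⟨by push_cast; ring, by ring, trivial⟩
      · intro x hx
        rcases List.mem_cons.1 hx with rfl | h
        · exact hQs x List.mem_cons_self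
        · exact hPQ x h
      · intro x hx
        rcases List.mem_cons.1 hx with rfl | h
        · exact hsk x List.mem_cons_self
        · exact hPk x h
      · intro x hx
        rcases List.mem_cons.1 hx with rfl | h
        · exact List.mem_cons_self
        · exact List.mem_cons_of_mem _ (hrestP x h)
      · intro x hx
        rcases List.mem_cons.1 hx with rfl | h
        · exact Or.inl List.mem_cons_self
        · rcases hPsv x h with hst | hnv
          · rcases List.mem_append.1 hst with h1 | h1
            · exact Or.inr (hnewNV x (List.mem_reverse.1 h1))
            · exact Or.inl (List.mem_cons_of_mem _ h1)
          · exact Or.inr (fun hxv => hnv (List.mem_append_left _ hxv))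
      · intro x
        rw [hViff x]
        constructor
        · rintro (hxv | hxP)
          · rcases List.mem_append.1 hxv with h | h
            · exact Or.inl h
            · exact Or.inr (List.mem_cons_of_mem _ (hnewsP x h))
          · exact Or.inr (List.mem_cons_of_mem _ hxP)
        · rintro (hxv | hxP)
          · exact Or.inl (List.mem_append_left _ hxv)
          · rcases List.mem_cons.1 hxP with rfl | h
            · exact Or.inl (List.mem_append_left _ huv)
            · exact Or.inr h
-- ===== properties of the adjacency build; B's setdefault build equals A's modify build =====
def pvGood (G : PvAdj) : Prop :=
  G.keys.Nodup ∧
  (∀ u v, pvEdge G u v → G.contains v = true) ∧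
  (∀ u v, pvEdge G u v → pvEdge G v u)

theorem pvEdge_step (adj : PvAdj) (s e u v : Int) :
    pvEdge ((adj.modify s PySem.Set.empty (fun t => PySem.Set.add t e)).modify e
      PySem.Set.empty (fun t => PySem.Set.add t s)) u v
    ↔ (pvEdge adj u v ∨ (u = s ∧ v = e) ∨ (u = e ∧ v = s)) := by
  unfold pvEdge
  simp only [PySem.Dict.getD_modify]
  by_cases hes : e = s
  · subst hes
    by_cases hue : u = e
    · simp [hue, PySem.Set.mem_add]
    · simp [hue]
  · have hse : ¬ s = e := fun h => hes h.symm
    by_cases hue : u = e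
    · by_cases hus : u = s
      · exact absurd (hue ▸ hus) hes
      · simp [hue, hes, PySem.Set.mem_add]
    · by_cases hus : u = s
      · simp [hus, hse, PySem.Set.mem_add]
      · simp [hue, hus]

theorem pvNodupKeys_modify (d : PvAdj) (k : Int) (f : PySem.Set Int → PySem.Set Int)
    (h : d.keys.Nodup) : (d.modify k PySem.Set.empty f).keys.Nodup := by
  rw [PySem.Dict.keys_modify]
  cases hc : d.contains k with
  | true =>
    rw [PySem.Dict.keys_insert_of_contains _ _ hc]
    exact h
  | false =>
    rw [PySem.Dict.keys_insert_of_not_contains _ _ hc]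
    refine List.nodup_append.2 ⟨h, List.nodup_singleton _, ?_⟩
    intro a ha b hb hab
    rw [List.mem_singleton.1 hb] at hab
    have hak : d.contains k = true := by
      rw [← hab]; exact (PySem.Dict.contains_iff_mem_keys d a).2 ha
    rw [hc] at hak
    exact Bool.false_ne_true hak

theorem pvGood_step (adj : PvAdj) (s e : Int) (h : pvGood adj) :
    pvGood ((adj.modify s PySem.Set.empty (fun t => PySem.Set.add t e)).modify e
      PySem.Set.empty (fun t => PySem.Set.add t s)) := by
  obtain ⟨hnd, hmem, hsym⟩ := h
  refine ⟨pvNodupKeys_modify _ _ _ (pvNodupKeys_modify _ _ _ hnd), ?_, ?_⟩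
  · intro u v he
    rw [PySem.Dict.contains_modify, PySem.Dict.contains_modify]
    rcases (pvEdge_step adj s e u v).1 he with h1 | ⟨_, rfl⟩ | ⟨_, rfl⟩
    · simp [hmem u v h1]
    · simp
    · simp
  · intro u v he
    rw [pvEdge_step]
    rcases (pvEdge_step adj s e u v).1 he with h1 | ⟨rfl, rfl⟩ | ⟨rfl, rfl⟩
    · exact Or.inl (hsym u v h1)
    · exact Or.inr (Or.inr ⟨rfl, rfl⟩)
    · exact Or.inr (Or.inl ⟨rfl, rfl⟩)

theorem pvGood_foldl : ∀ (l : List (Int × Int)) (adj : PvAdj), pvGood adj →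
    pvGood (l.foldl (fun adj se =>
      (adj.modify se.1 PySem.Set.empty (fun t => PySem.Set.add t se.2)).modify se.2
        PySem.Set.empty (fun t => PySem.Set.add t se.1)) adj) := by
  intro l
  induction l with
  | nil => intro adj h; exact h
  | cons se l ih =>
    intro adj h
    exact ih _ (pvGood_step adj se.1 se.2 h)

theorem pvGood_empty : pvGood PySem.Dict.empty := by
  refine ⟨by simp [PySem.Dict.empty, PySem.Dict.keys], ?_, ?_⟩ <;>
  · intro u v he
    exfalso
    simp [pvEdge, PySem.Dict.getD, PySem.Dict.get?, PySem.Dict.empty, PySem.Set.empty] at he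

theorem pvBuild_good (wmap : List (Int × Int)) : pvGood (buildAdjA wmap) :=
  pvGood_foldl wmap PySem.Dict.empty pvGood_empty

-- B's setdefault-then-insert step is A's modify step
theorem pvSetdefault_add_eq_modify (d : PvAdj) (k x : Int) :
    (d.setdefault k PySem.Set.empty).insert k
      (PySem.Set.add ((d.setdefault k PySem.Set.empty).getD k PySem.Set.empty) x)
      = d.modify k PySem.Set.empty (fun t => PySem.Set.add t x) := by
  cases hc : d.contains k with
  | true =>
    rw [PySem.Dict.setdefault_of_contains _ _ hc]
    rfl
  | false =>
    rw [PySem.Dict.setdefault_of_not_contains _ _ hc]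
    rw [PySem.Dict.getD_insert_self, PySem.Dict.insert_insert_self]
    unfold PySem.Dict.modify
    rw [PySem.Dict.getD_of_not_contains _ _ hc]

theorem pvBuild_eq (wmap : List (Int × Int)) : buildAdjB wmap = buildAdjA wmap := by
  suffices h : ∀ (l : List (Int × Int)) (adj : PvAdj),
      l.foldl (fun adj se =>
        let a1 := adj.setdefault se.1 PySem.Set.empty
        let a2 := a1.insert se.1 (PySem.Set.add (a1.getD se.1 PySem.Set.empty) se.2)
        let b1 := a2.setdefault se.2 PySem.Set.empty
        b1.insert se.2 (PySem.Set.add (b1.getD se.2 PySem.Set.empty) se.1)) adj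
      = l.foldl (fun adj se =>
        (adj.modify se.1 PySem.Set.empty (fun t => PySem.Set.add t se.2)).modify se.2
          PySem.Set.empty (fun t => PySem.Set.add t se.1)) adj by
    exact h wmap PySem.Dict.empty
  intro l
  induction l with
  | nil => intro adj; rfl
  | cons se l ih =>
    intro adj
    rw [List.foldl_cons, List.foldl_cons, ih]
    congr 1
    simp only []
    rw [pvSetdefault_add_eq_modify, pvSetdefault_add_eq_modify]
-- ===== co-closure: reach from outside a closed set stays outside (needs symmetry) =====
theorem pvReach_not_in_V {G : PvAdj} (hsym : ∀ u v, pvEdge G u v → pvEdge G v u)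
    {V : List Int} (hVcl : ∀ u v, u ∈ V → pvEdge G u v → v ∈ V)
    {a b : Int} (hr : pvReach G a b) (ha : a ∉ V) : b ∉ V := by
  induction hr with
  | refl => exact ha
  | tail h e ih =>
    intro hcV
    exact ih (hVcl _ _ hcV (hsym _ _ e))

theorem pvReach_keep_of_reach {G : PvAdj} (hsym : ∀ u v, pvEdge G u v → pvEdge G v u)
    {V : List Int} (hVcl : ∀ u v, u ∈ V → pvEdge G u v → v ∈ V)
    {a b : Int} (ha : a ∉ V) (hr : pvReach G a b) : pvReach (pvKeep G V) a b := by
  induction hr with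
  | refl => exact Relation.ReflTransGen.refl
  | @tail b c h e ih =>
    have hb : b ∉ V := pvReach_not_in_V hsym hVcl h ha
    exact Relation.ReflTransGen.tail ih ((pvEdge_keep_iff hb c).2 e)

theorem pvKeep_congr (G : PvAdj) {R1 R2 : List Int} (h : ∀ x, x ∈ R1 ↔ x ∈ R2) :
    pvKeep G R1 = pvKeep G R2 := by
  unfold pvKeep
  congr 1
  exact List.filter_congr (fun x _ => by simp [h x.1])

-- ===== the two outer loops agree, one component at a time =====
theorem pvLoop_sim (G : PvAdj)
    (hknd : G.keys.Nodup)
    (hmemk : ∀ u v, pvEdge G u v → G.contains v = true)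
    (hsym : ∀ u v, pvEdge G u v → pvEdge G v u) :
    ∀ (rest pre : List Int) (V : PySem.Set Int) (H : PvAdj) (fuelA : Nat),
      G.keys = pre ++ rest →
      (∀ x ∈ pre, x ∈ V) →
      (∀ x ∈ V, G.contains x = true) →
      V.Nodup →
      (∀ u v, u ∈ V → pvEdge G u v → v ∈ V) →
      H = pvKeep G V →
      H.size < fuelA →
      loopA fuelA H = loopB G rest V := by
  intro rest
  induction rest with
  | nil =>
    intro pre V H fuelA hkeys hpreV hVk hVnd hVcl hH hfuel
    have hHkeys : H.keys = [] := by
      rw [hH, pvKeys_keep, hkeys, List.append_nil]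
      exact List.filter_eq_nil_iff.2 (fun a ha => by simp [hpreV a ha])
    cases fuelA with
    | zero => rfl
    | succ f => simp [loopA, loopB, hHkeys]
  | cons k rest' ih =>
    intro pre V H fuelA hkeys hpreV hVk hVnd hVcl hH hfuel
    by_cases hkV : k ∈ V
    · have hB : loopB G (k :: rest') V = loopB G rest' V := by
        simp [loopB, PySem.Set.contains, hkV]
      rw [hB]
      exact ih (pre ++ [k]) V H fuelA (by rw [hkeys, List.append_assoc]; rfl)
        (fun x hx => by
          rcases List.mem_append.1 hx with h | h
          · exact hpreV x h
          · exact (List.mem_singleton.1 h) ▸ hkV)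
        hVk hVnd hVcl hH hfuel
    · -- k is the first key of H; A explores its component, B runs its DFS
      have hkGk : k ∈ G.keys := by rw [hkeys]; exact List.mem_append_right _ List.mem_cons_self
      have hkc : G.contains k = true := (PySem.Dict.contains_iff_mem_keys G k).2 hkGk
      have hHkeys : H.keys = k :: rest'.filter (fun x => !decide (x ∈ V)) := by
        rw [hH, pvKeys_keep, hkeys, List.filter_append]
        have hpre : pre.filter (fun x => !decide (x ∈ V)) = [] :=
          List.filter_eq_nil_iff.2 (fun a ha => by simp [hpreV a ha])
        rw [hpre]
        simp [hkV]
      cases fuelA with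
      | zero => omega
      | succ f =>
        have hkcH : H.contains k = true :=
          (PySem.Dict.contains_iff_mem_keys H k).2 (by rw [hHkeys]; exact List.mem_cons_self)
        obtain ⟨R, hRnd, hRiff, hRres⟩ := pvExploreA_spec (H.size + 1) H k (by omega)
        have hkR : k ∈ R := (hRiff k).2 ⟨hkcH, Relation.ReflTransGen.refl⟩
        -- B's DFS on the same component
        have hvadd : ∀ x, x ∈ PySem.Set.add V k ↔ (x ∈ V ∨ x = k) :=
          fun x => PySem.Set.mem_add V k x
        obtain ⟨P, V', hBres, hPnd, hPQ, hPk, hstP, hPsv, hViff, hVnd', hVcl'⟩ :=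
          pvDfsB_spec (G.size + 1) G [k] (PySem.Set.add V k) 0 0 (pvReach G k)
            hknd hmemk (PySem.Set.nodup_add V k hVnd) (List.nodup_singleton k)
            (fun x hx => (hvadd x).2 (Or.inr (List.mem_singleton.1 hx)))
            (fun x hx => (List.mem_singleton.1 hx) ▸ hkc)
            (fun x hx hxs v he => by
              rcases (hvadd x).1 hx with hxV | rfl
              · exact (hvadd v).2 (Or.inl (hVcl x v hxV he))
              · exact absurd (List.mem_singleton.2 rfl) hxs)
            (fun x hx => (List.mem_singleton.1 hx) ▸ Relation.ReflTransGen.refl)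
            (fun u v hu he => Relation.ReflTransGen.tail hu he)
            (by
              have hlt : (G.keys.filter (fun x => !decide (x ∈ PySem.Set.add V k))).length
                  < G.keys.length :=
                List.length_filter_lt_length_iff_exists.2
                  ⟨k, hkGk, by simp [(hvadd k).2 (Or.inr rfl)]⟩
              have hkl : G.keys.length = G.size := by
                simp [PySem.Dict.keys, PySem.Dict.size]
              simp only [List.length_singleton]
              omega)
        have hkP : k ∈ P := hstP k List.mem_cons_self
        -- membership bridge between A's removed set R and B's popped set P
        have hRP : ∀ x, x ∈ R ↔ x ∈ P := by
          intro x
          constructor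
          · intro hx
            obtain ⟨hcHx, hrHx⟩ := (hRiff x).1 hx
            have hrGx : pvReach G k x := by
              rw [hH] at hrHx
              exact pvReach_keep_mono hrHx
            have hVall : ∀ y, pvReach G k y → y ∈ V' := by
              intro y hy
              induction hy with
              | refl => exact (hViff k).2 (Or.inl ((hvadd k).2 (Or.inr rfl)))
              | tail h e ihy => exact hVcl' _ ihy _ e
            have hxV' := hVall x hrGx
            rcases (hViff x).1 hxV' with hxv | hxP
            · rcases (hvadd x).1 hxv with hxV | rfl
              · exfalso
                have hxnV : x ∉ V := by
                  rw [hH] at hcHx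
                  exact ((pvContains_keep G V x).1 hcHx).1
                exact hxnV hxV
              · exact hkP
            · exact hxP
          · intro hx
            have hrGx : pvReach G k x := hPQ x hx
            have hxnV : x ∉ V := pvReach_not_in_V hsym (fun u v hu he => hVcl u v hu he) hrGx hkV
            refine (hRiff x).2 ⟨?_, ?_⟩
            · rw [hH]
              exact (pvContains_keep G V x).2 ⟨hxnV, hPk x hx⟩
            · rw [hH]
              exact pvReach_keep_of_reach hsym hVcl hkV hrGx
        have hperm : R.Perm P := (List.perm_ext_iff_of_nodup hRnd hPnd).2 hRP
        have hlen : R.length = P.length := hperm.length_eq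
        have hEntGR : pvEnt G R = pvEnt G P := pvEnt_perm G hperm
        have hEntHR : pvEnt H R = pvEnt G R := by
          refine pvEnt_congr (fun x hx => ?_)
          have hxnV : x ∉ V := by
            have := ((hRiff x).1 hx).1
            rw [hH] at this
            exact ((pvContains_keep G V x).1 this).1
          rw [hH, pvGetD_keep]
          simp [hxnV]
        -- the two tests agree
        have hcond : (1 < (exploreA (H.size + 1) H k).1) ↔ (2 * ((0:Int) + P.length) < 0 + pvEnt G P) := by
          rw [hRres]
          simp only []
          rw [hEntHR, hEntGR]
          omega
        -- unfold one step of each loop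
        have hA1 : loopA (f + 1) H
            = (if 1 < (exploreA (H.size + 1) H k).1 then false
               else loopA f (exploreA (H.size + 1) H k).2) := by
          conv_lhs => rw [loopA]
          rw [hHkeys]
        have hB1 : loopB G (k :: rest') V
            = (if 2 * ((0:Int) + P.length) < 0 + pvEnt G P then false
               else loopB G rest' V') := by
          conv_lhs => rw [loopB]
          have hkVc : V.contains k = false := by
            simp [PySem.Set.contains]
            exact hkV
          rw [hkVc]
          simp only [Bool.false_eq_true, if_false, hBres]
        rw [hA1, hB1]
        by_cases hc : 2 * ((0:Int) + P.length) < 0 + pvEnt G P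
        · rw [if_pos hc, if_pos (hcond.2 hc)]
        · rw [if_neg hc, if_neg (fun h => hc (hcond.1 h))]
          -- recurse on the remaining keys
          have hH' : (exploreA (H.size + 1) H k).2 = pvKeep G V' := by
            rw [hRres]
            simp only []
            rw [hH, pvKeep_keep]
            refine pvKeep_congr G (fun x => ?_)
            rw [List.mem_append]
            rw [hViff x, hvadd x]
            constructor
            · rintro (h | h)
              · exact Or.inl (Or.inl h)
              · exact Or.inr ((hRP x).1 h)
            · rintro ((h | rfl) | h)
              · exact Or.inl h
              · exact Or.inr hkR
              · exact Or.inr ((hRP x).2 h)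
          have hsize' : (pvKeep G V').size < f := by
            have h1 : (pvKeep H R).size < H.size := pvSize_keep_lt H R k hkcH hkR
            have h2 : (exploreA (H.size + 1) H k).2 = pvKeep H R := by rw [hRres]
            have h3 : pvKeep G V' = pvKeep H R := by rw [← hH', h2]
            rw [h3]
            omega
          rw [hH']
          exact ih (pre ++ [k]) V' (pvKeep G V') f
            (by rw [hkeys, List.append_assoc]; rfl)
            (fun x hx => by
              rcases List.mem_append.1 hx with h | h
              · exact (hViff x).2 (Or.inl ((hvadd x).2 (Or.inl (hpreV x h))))
              · exact (List.mem_singleton.1 h) ▸ ((hViff k).2 (Or.inr hkP)))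
            (fun x hx => by
              rcases (hViff x).1 hx with h | h
              · rcases (hvadd x).1 h with h1 | rfl
                · exact hVk x h1
                · exact hkc
              · exact hPk x h)
            hVnd'
            (fun u v hu he => hVcl' u hu v he)
            rfl hsize'

-- ===== VERDICT (by name: the statement is the Claim_ definition above) =====
theorem solution_spec : Claim_equal_solution := by
  unfold Claim_equal_solution
  intro n wmap _
  unfold Spec_solution solution solution_alt
  rw [pvBuild_eq]
  obtain ⟨hknd, hmemk, hsym⟩ := pvBuild_good wmap
  exact pvLoop_sim (buildAdjA wmap) hknd hmemk hsym (buildAdjA wmap).keys []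
    PySem.Set.empty (buildAdjA wmap) ((buildAdjA wmap).size + 1)
    (by simp) (by simp) (fun x hx => absurd hx (List.not_mem_nil))
    List.nodup_nil (fun u v hu _ => absurd hu (List.not_mem_nil))
    (pvKeep_nil _).symm (by omega)
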